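-- pv_equiv track=rewrite | github.com/MuhammetSonmez/Zhu-Takaoka-Algorithm | Zhu-Takaoka.py | zhu_takaoka_for_inputs
-- ===== SOURCE A (Python) =====
-- def zhu_takaoka(path):
--     points = list(range(len(path)))
--     #points listesi, path indislerini içeren bir listeye atanır.
--     key = []
--     #anahtar listesi başlangıçta boş bir değer olarak atanır
--     while len(points) > 0:
--         leftmost_point = min(points)
--         #leftmost_point, anahtar listesine eklenir.
--         key.append(leftmost_point)
--         # leftmost_point'tan daha büyük olan tüm elemanlar points listesinden çıkarılır.
--         points = [p for p in points if p > leftmost_point]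
--         #path[leftmost_point]'den daha büyük olan tüm elemanlar right_points listesine atanır.
--         right_points = [p for p in points if path[p] > path[leftmost_point]]
--         # right_points listesi boş değilse,
--         if len(right_points) > 0:
--             # rightmost_point, right_points listesindeki en küçük elemanı alır.
--             rightmost_point = min(right_points)
--             key.append(rightmost_point)
--             # rightmost_point, anahtar listesine eklenir.
--             points = [p for p in points if p < rightmost_point]
--             # rightmost_point'tan küçük olan tüm elemanlar points listesinden çıkarılır.
--     return key # Anahtar listesi döndürülür.
--
-- def zhu_takaoka_for_inputs(inputs):
--     key = []
--     # Anahtar listesi başlangıçta boştur.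
--     for i in range(len(inputs)):
--         # inputs[i], A'ya eşitse, key listesine T eklenir.
--         if inputs[i] == "A":
--             key.append("T")
--         # inputs[i], S'ye eşitse, key listesine G eklenir.
--         elif inputs[i] == "S":
--             key.append("G")
--         # inputs[i], T'ye eşitse, key listesine A eklenir.
--         elif inputs[i] == "T":
--             key.append("A")
--         # inputs[i], G'ye eşitse, key listesine S eklenir.
--         elif inputs[i] == "G":
--             key.append("S")
--     # remaining_inputs listesi, A, S, T veya G içermeyen elemanları içerir.
--     remaining_inputs = [l for l in inputs if l != "A" and l != "S" and l != "T" and l!= "G"]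
--     # remaining_path, remaining_inputs listesinin karakterlerinin ASCII değerlerini içeren bir liste olarak oluşturulur.
--     remaining_path = [ord(l) for l in remaining_inputs]
--     # zhu_takaoka() fonksiyonu çağırılır.
--     remaining_key = zhu_takaoka(remaining_path)
--     for idx in remaining_key:
--         key.append(remaining_inputs[idx])
--
--     return key
-- ===== SOURCE B (Python) =====
-- _COMP = {"A": "T", "S": "G", "T": "A", "G": "S"}
--
-- def zhu_takaoka_for_inputs(inputs):
--     # complement the mapped letters in one comprehension via the table
--     key = [_COMP[c] for c in inputs if c in _COMP]
--     rest = [c for c in inputs if c not in _COMP]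
--     # window [lo, hi): emit lo, then the first strictly greater char after it
--     # inside the window, which becomes the new right boundary
--     lo, hi = 0, len(rest)
--     while lo < hi:
--         key.append(rest[lo])
--         j = lo + 1
--         while j < hi and rest[j] <= rest[lo]:
--             j += 1
--         if j < hi:
--             key.append(rest[j])
--             hi = j
--         lo += 1
--     return key
-- ===== Notes on version B (the rewrite author's own statement) =====
-- stated objective: alternative
-- what changed: B replaces A's repeated list comprehensions and min() scans over a shrinking points list (and the four-way elif chain) by a dict-driven single comprehension plus a two-index window [lo, hi) that emits lo and the first strictly greater character found by a direct forward scan, which becomes the new right boundary.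
import Mathlib
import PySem

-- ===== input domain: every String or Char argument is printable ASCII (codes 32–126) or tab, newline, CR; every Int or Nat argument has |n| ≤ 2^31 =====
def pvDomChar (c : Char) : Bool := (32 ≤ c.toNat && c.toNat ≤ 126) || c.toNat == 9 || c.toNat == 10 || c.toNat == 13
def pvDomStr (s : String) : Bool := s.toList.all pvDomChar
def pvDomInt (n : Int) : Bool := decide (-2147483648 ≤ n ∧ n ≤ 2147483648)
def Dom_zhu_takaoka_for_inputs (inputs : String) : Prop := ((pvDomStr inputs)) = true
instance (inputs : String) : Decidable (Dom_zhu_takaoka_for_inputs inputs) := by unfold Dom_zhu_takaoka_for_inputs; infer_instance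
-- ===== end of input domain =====

-- B replaces A's repeated list comprehensions + min() over a shrinking points list by two
-- integer window bounds with a direct forward scan (objective: alternative).

-- ===== PORT A =====
-- the while-loop of zhu_takaoka; fuel bounds the iterations (each turn removes min(points)
-- from points, so |points| iterations suffice).  min? = none exactly when the loop guard
-- len(points) > 0 fails.  pyGetD with a default is exact here: points holds valid indices.
def ztLoop (path : List Int) : Nat → List Int → List Int → List Int
  | 0, _, key => key
  | fuel+1, points, key =>
    match PySem.List.min? points (fun x => x) with
    | none => key
    | some leftmost =>
      let key := key ++ [leftmost]
      let points := points.filter (fun p => decide (leftmost < p))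
      let rightPoints := points.filter (fun p =>
        decide (PySem.List.pyGetD path leftmost 0 < PySem.List.pyGetD path p 0))
      match PySem.List.min? rightPoints (fun x => x) with
      | none => ztLoop path fuel points key
      | some rightmost =>
        ztLoop path fuel (points.filter (fun p => decide (p < rightmost))) (key ++ [rightmost])

def zhu_takaoka (path : List Int) : List Int :=
  let points := PySem.List.pyRange 0 (path.length : Int)
  ztLoop path points.length points []

-- for i in range(len(inputs)): inputs[i] — a forward pass over the characters
def zhu_takaoka_for_inputs (inputs : String) : List String :=
  let key := inputs.toList.foldl (fun key c =>
    if c = 'A' then key ++ ["T"]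
    else if c = 'S' then key ++ ["G"]
    else if c = 'T' then key ++ ["A"]
    else if c = 'G' then key ++ ["S"]
    else key) []
  let remaining := inputs.toList.filter (fun l => !(l == 'A') && !(l == 'S') && !(l == 'T') && !(l == 'G'))
  let remainingPath := remaining.map (fun l => (l.toNat : Int))
  let remainingKey := zhu_takaoka remainingPath
  -- remaining_inputs[idx]: idx is always a valid index, so the default is never used
  remainingKey.foldl (fun key idx => key ++ [String.ofList [PySem.List.pyGetD remaining idx ' ']]) key

-- ===== PORT B =====
def compDict : PySem.Dict String String :=
  PySem.Dict.ofList [("A","T"),("S","G"),("T","A"),("G","S")]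

-- inner while: j += 1 while j < hi and rest[j] <= rest[lo]  (indices stay in range)
def altScan (rest : List Char) (x : Char) (hi : Nat) (j : Nat) : Nat :=
  if h : j < hi ∧ rest.getD j ' ' ≤ x then altScan rest x hi (j+1) else j
termination_by hi - j
decreasing_by have := h.1; omega

-- outer while over the window [lo, hi)
def altWindow (rest : List Char) (lo hi : Nat) (key : List String) : List String :=
  if h : lo < hi then
    let key := key ++ [String.ofList [rest.getD lo ' ']]
    let j := altScan rest (rest.getD lo ' ') hi (lo+1)
    if hj : j < hi then altWindow rest (lo+1) j (key ++ [String.ofList [rest.getD j ' ']])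
    else altWindow rest (lo+1) hi key
  else key
termination_by hi - lo
decreasing_by all_goals omega

def zhu_takaoka_for_inputs_alt (inputs : String) : List String :=
  let key := inputs.toList.filterMap (fun c => PySem.Dict.get? compDict (String.ofList [c]))
  let rest := inputs.toList.filter (fun c => (PySem.Dict.get? compDict (String.ofList [c])).isNone)
  altWindow rest 0 rest.length key

-- ===== PRECONDITION & SPEC =====
def Spec_zhu_takaoka_for_inputs (inputs : String) (out : List String) : Prop := out = zhu_takaoka_for_inputs_alt inputs
instance (inputs : String) (out : List String) : Decidable (Spec_zhu_takaoka_for_inputs inputs out) := by unfold Spec_zhu_takaoka_for_inputs; infer_instance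

-- ===== CLAIM (what is proved, stated in full; the proofs are below) =====
def Claim_equal_zhu_takaoka_for_inputs : Prop := ∀ (inputs : String), Dom_zhu_takaoka_for_inputs inputs → Spec_zhu_takaoka_for_inputs inputs (zhu_takaoka_for_inputs inputs)

-- ===== LEMMAS AND PROOFS =====

theorem foldl_min_eq (x : Int) (t : List Int) (h : ∀ y ∈ t, x ≤ y) : t.foldl min x = x := by
  induction t with
  | nil => rfl
  | cons a t ih =>
    simp only [List.foldl_cons]
    rw [min_eq_left (h a (by simp))]
    exact ih (fun y hy => h y (by simp [hy]))

theorem min?_cons_of_min (a : Int) (t : List Int) (h : ∀ y ∈ t, a ≤ y) :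
    PySem.List.min? (a :: t) (fun y => y) = some a := by
  rw [PySem.List.min?_id_cons, foldl_min_eq a t h]

theorem min?_pyRange {a b : Int} (h : a < b) :
    PySem.List.min? (PySem.List.pyRange a b) (fun y => y) = some a := by
  rw [PySem.List.pyRange_one_cons h]
  exact min?_cons_of_min a _ (fun y hy => by
    have := PySem.List.mem_pyRange_one.mp hy; omega)

-- filter p > a over range [a, b) = range [a+1, b)
theorem filter_gt_pyRange (a b : Int) :
    (PySem.List.pyRange a b).filter (fun p => decide (a < p)) = PySem.List.pyRange (a+1) b := by
  by_cases h : a < b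
  · rw [PySem.List.pyRange_one_cons h]
    simp only [List.filter_cons, decide_eq_true_eq, lt_self_iff_false, if_false]
    exact List.filter_eq_self.mpr (fun p hp => by
      have := PySem.List.mem_pyRange_one.mp hp
      simp only [decide_eq_true_eq]
      omega)
  · rw [PySem.List.pyRange_one_eq_nil (by omega), PySem.List.pyRange_one_eq_nil (by omega)]
    rfl

-- filter p < m over range [a, b) = range [a, m)  (for m ≤ b)
theorem filter_lt_pyRange (m : Int) : ∀ (d : Nat) (a b : Int), m ≤ b → (b - a).toNat ≤ d →
    (PySem.List.pyRange a b).filter (fun p => decide (p < m)) = PySem.List.pyRange a m := by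
  intro d
  induction d with
  | zero =>
    intro a b hm hd
    rw [PySem.List.pyRange_one_eq_nil (by omega), PySem.List.pyRange_one_eq_nil (by omega)]
    rfl
  | succ d ih =>
    intro a b hm hd
    by_cases h : a < b
    · rw [PySem.List.pyRange_one_cons h]
      simp only [List.filter_cons, decide_eq_true_eq]
      by_cases ham : a < m
      · rw [if_pos ham, ih (a+1) b hm (by omega), PySem.List.pyRange_one_cons ham]
      · rw [if_neg ham, ih (a+1) b hm (by omega),
          PySem.List.pyRange_one_eq_nil (by omega), PySem.List.pyRange_one_eq_nil (by omega)]
    · rw [PySem.List.pyRange_one_eq_nil (by omega), PySem.List.pyRange_one_eq_nil (by omega)]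
      rfl

-- A's min over the filtered right points IS B's forward scan
theorem scan_min (rest : List Char) (x : Char) (hi : Nat) (C : Int → Bool)
    (hC : ∀ k : Nat, k < hi → (C k = true ↔ ¬ (rest.getD k ' ' ≤ x))) :
    ∀ (d j0 : Nat), hi - j0 ≤ d →
      PySem.List.min? ((PySem.List.pyRange j0 hi).filter C) (fun y => y)
        = (if altScan rest x hi j0 < hi then some ((altScan rest x hi j0 : Nat) : Int) else none) := by
  intro d
  induction d with
  | zero =>
    intro j0 h
    rw [PySem.List.pyRange_one_eq_nil (by exact_mod_cast (by omega : hi ≤ j0))]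
    rw [altScan.eq_def, dif_neg (fun hcon => absurd hcon.1 (by omega)), if_neg (by omega)]
    rfl
  | succ d ih =>
    intro j0 h
    by_cases hlt : j0 < hi
    · rw [PySem.List.pyRange_one_cons (by exact_mod_cast hlt)]
      rw [show ((j0 : Int) + 1) = ((j0 + 1 : Nat) : Int) by push_cast; ring]
      simp only [List.filter_cons]
      by_cases hcj : C j0 = true
      · rw [if_pos hcj]
        rw [min?_cons_of_min _ _ (fun y hy => by
          have := PySem.List.mem_pyRange_one.mp (List.mem_filter.mp hy).1
          omega)]
        have hnle : ¬ (rest.getD j0 ' ' ≤ x) := (hC j0 hlt).mp hcj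
        rw [altScan.eq_def, dif_neg (fun hcon => hnle hcon.2), if_pos hlt]
      · rw [if_neg hcj]
        have hle : rest.getD j0 ' ' ≤ x := by
          by_contra hnot; exact hcj ((hC j0 hlt).mpr hnot)
        rw [ih (j0 + 1) (by omega)]
        rw [altScan.eq_def (j := j0), dif_pos ⟨hlt, hle⟩]
    · rw [PySem.List.pyRange_one_eq_nil (by exact_mod_cast (by omega : hi ≤ j0))]
      rw [altScan.eq_def, dif_neg (fun hcon => absurd hcon.1 (by omega)), if_neg (by omega)]
      rfl

-- accumulator lemma for A's loop
theorem ztLoop_acc (path : List Int) : ∀ (fuel : Nat) (points key : List Int),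
    ztLoop path fuel points key = key ++ ztLoop path fuel points [] := by
  intro fuel
  induction fuel with
  | zero => intro points key; simp [ztLoop]
  | succ fuel ih =>
    intro points key
    cases hmin : PySem.List.min? points (fun x => x) with
    | none => simp [ztLoop, hmin]
    | some m =>
      simp only [ztLoop, hmin]
      split
      all_goals (conv_lhs => rw [ih])
      all_goals (conv_rhs => rw [ih])
      all_goals simp

-- accumulator lemma for B's loop
theorem altWindow_acc (rest : List Char) : ∀ (d lo hi : Nat) (key : List String), hi - lo ≤ d →
    altWindow rest lo hi key = key ++ altWindow rest lo hi [] := by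
  intro d
  induction d with
  | zero =>
    intro lo hi key h
    rw [altWindow.eq_def, altWindow.eq_def]
    rw [dif_neg (by omega), dif_neg (by omega)]
    simp
  | succ d ih =>
    intro lo hi key h
    by_cases hlh : lo < hi
    · rw [altWindow.eq_def]
      conv_rhs => rw [altWindow.eq_def]
      simp only [dif_pos hlh]
      by_cases hj : altScan rest (rest.getD lo ' ') hi (lo + 1) < hi
      · simp only [dif_pos hj]
        rw [ih (lo + 1) _ _ (by omega)]
        conv_rhs => rw [ih (lo + 1) _ _ (by omega)]
        simp
      · simp only [dif_neg hj]
        rw [ih (lo + 1) hi _ (by omega)]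
        conv_rhs => rw [ih (lo + 1) hi _ (by omega)]
        simp
    · rw [altWindow.eq_def, altWindow.eq_def]
      rw [dif_neg hlh, dif_neg hlh]
      simp

-- the core correspondence: A's loop on the index range [lo, hi), read back through the
-- characters, is B's window loop
theorem core (rest : List Char) : ∀ (fuel lo hi : Nat), hi ≤ rest.length → hi - lo ≤ fuel →
    (ztLoop (rest.map (fun l => (l.toNat : Int))) fuel (PySem.List.pyRange lo hi) []).map
        (fun idx => String.ofList [PySem.List.pyGetD rest idx ' '])
      = altWindow rest lo hi [] := by
  intro fuel
  induction fuel with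
  | zero =>
    intro lo hi hlen h
    rw [PySem.List.pyRange_one_eq_nil (by exact_mod_cast (by omega : hi ≤ lo))]
    rw [altWindow.eq_def, dif_neg (by omega)]
    rfl
  | succ fuel ih =>
    intro lo hi hlen h
    by_cases hlh : lo < hi
    · have hget : ∀ k : Nat, k < hi →
          PySem.List.pyGetD (rest.map (fun l => (l.toNat : Int))) (k : Nat) 0
            = ((rest.getD k ' ').toNat : Int) := by
        intro k hk
        rw [PySem.List.pyGetD_natCast]
        rw [List.getD_eq_getElem _ _ (by simpa using (by omega : k < rest.length)),
            List.getElem_map, List.getD_eq_getElem _ _ (by omega)]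
      have hCspec : ∀ k : Nat, k < hi →
          ((decide (PySem.List.pyGetD (rest.map (fun l => (l.toNat : Int))) (lo : Nat) 0
              < PySem.List.pyGetD (rest.map (fun l => (l.toNat : Int))) (k : Nat) 0)) = true
            ↔ ¬ (rest.getD k ' ' ≤ rest.getD lo ' ')) := by
        intro k hk
        rw [hget lo hlh, hget k hk]
        simp only [decide_eq_true_eq, Int.lt_iff_add_one_le]
        constructor
        · intro hlt hle
          have h1 : (rest.getD lo ' ').toNat < (rest.getD k ' ').toNat := by omega
          exact absurd h1 (by exact_mod_cast not_lt.mpr hle)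
        · intro hnle
          have h1 : (rest.getD lo ' ') < (rest.getD k ' ') := lt_of_not_ge hnle
          have h2 : (rest.getD lo ' ').toNat < (rest.getD k ' ').toNat := h1
          omega
      simp only [ztLoop, min?_pyRange (show ((lo : Nat) : Int) < ((hi : Nat) : Int) by exact_mod_cast hlh)]
      rw [filter_gt_pyRange]
      rw [show (((lo : Nat) : Int) + 1) = (((lo + 1 : Nat)) : Int) by push_cast; ring]
      rw [scan_min rest (rest.getD lo ' ') hi _
            (fun k hk => by
              simpa using hCspec k hk) hi (lo + 1) (by omega)]
      by_cases hj : altScan rest (rest.getD lo ' ') hi (lo + 1) < hi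
      · simp only [if_pos hj]
        rw [filter_lt_pyRange _ hi ((lo + 1 : Nat) : Int) ((hi : Nat) : Int)
              (by exact_mod_cast Nat.le_of_lt hj) (by omega)]
        rw [ztLoop_acc]
        rw [List.map_append]
        rw [ih (lo + 1) (altScan rest (rest.getD lo ' ') hi (lo + 1)) (by omega) (by omega)]
        conv_rhs => rw [altWindow.eq_def]
        rw [dif_pos hlh]
        simp only [dif_pos hj]
        conv_rhs => rw [altWindow_acc rest (altScan rest (rest.getD lo ' ') hi (lo + 1)) (lo + 1) _ _ (by omega)]
        simp [PySem.List.pyGetD_natCast]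
      · simp only [if_neg hj]
        rw [ztLoop_acc]
        rw [List.map_append]
        rw [ih (lo + 1) hi hlen (by omega)]
        conv_rhs => rw [altWindow.eq_def]
        rw [dif_pos hlh]
        simp only [dif_neg hj]
        conv_rhs => rw [altWindow_acc rest hi (lo + 1) _ _ (by omega)]
        simp [PySem.List.pyGetD_natCast]
    · rw [PySem.List.pyRange_one_eq_nil (by exact_mod_cast (by omega : hi ≤ lo))]
      rw [altWindow.eq_def, dif_neg (by omega)]
      cases fuel <;> rfl

theorem get_comp (c : Char) : PySem.Dict.get? compDict (String.ofList [c]) =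
    (if c = 'A' then some "T" else if c = 'S' then some "G"
     else if c = 'T' then some "A" else if c = 'G' then some "S" else none) := by
  by_cases h1 : c = 'A'
  · subst h1; rfl
  by_cases h2 : c = 'S'
  · subst h2; rfl
  by_cases h3 : c = 'T'
  · subst h3; rfl
  by_cases h4 : c = 'G'
  · subst h4; rfl
  rw [if_neg h1, if_neg h2, if_neg h3, if_neg h4]
  have hi : compDict.items = [("A","T"),("S","G"),("T","A"),("G","S")] := by rfl
  have e : ∀ d : Char, ¬ c = d → ((String.ofList [d] == String.ofList [c]) = false) := by
    intro d hd
    simp only [beq_eq_false_iff_ne, ne_eq]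
    intro hcon
    apply hd
    have := congrArg String.toList hcon
    simp at this
    exact this.symm
  simp only [PySem.Dict.get?, hi]
  rw [List.find?_cons_of_neg (by simp [e 'A' h1]),
      List.find?_cons_of_neg (by simp [e 'S' h2]),
      List.find?_cons_of_neg (by simp [e 'T' h3]),
      List.find?_cons_of_neg (by simp [e 'G' h4])]
  rfl

theorem fold_eq_filterMap (cs : List Char) : ∀ key : List String,
    cs.foldl (fun key c =>
      if c = 'A' then key ++ ["T"]
      else if c = 'S' then key ++ ["G"]
      else if c = 'T' then key ++ ["A"]
      else if c = 'G' then key ++ ["S"]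
      else key) key
    = key ++ cs.filterMap (fun c => PySem.Dict.get? compDict (String.ofList [c])) := by
  induction cs with
  | nil => intro key; simp
  | cons c cs cih =>
    intro key
    rw [List.foldl_cons, List.filterMap_cons, get_comp, cih]
    split_ifs <;> simp

theorem pred_eq (c : Char) :
    (!(c == 'A') && !(c == 'S') && !(c == 'T') && !(c == 'G'))
      = (PySem.Dict.get? compDict (String.ofList [c])).isNone := by
  rw [get_comp]
  by_cases h1 : c = 'A' <;> by_cases h2 : c = 'S' <;> by_cases h3 : c = 'T' <;>
    by_cases h4 : c = 'G' <;> simp [h1, h2, h3, h4]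

-- ===== VERDICT (by name: the statement is the Claim_ definition above) =====
theorem zhu_takaoka_for_inputs_spec : Claim_equal_zhu_takaoka_for_inputs := by
  unfold Claim_equal_zhu_takaoka_for_inputs
  intro inputs _
  unfold Spec_zhu_takaoka_for_inputs zhu_takaoka_for_inputs zhu_takaoka_for_inputs_alt zhu_takaoka
  simp only []
  rw [List.filter_congr (fun c _ => pred_eq c)]
  rw [fold_eq_filterMap, PySem.List.foldl_append_singleton_eq_map, List.nil_append]
  conv_rhs => rw [altWindow_acc _ (List.filter (fun c => (PySem.Dict.get? compDict (String.ofList [c])).isNone) inputs.toList).length 0 _ _ (by omega)]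
  congr 1
  simp only [List.length_map, PySem.List.length_pyRange_one, Int.sub_zero, Int.toNat_natCast]
  have h := core (List.filter (fun c => (PySem.Dict.get? compDict (String.ofList [c])).isNone) inputs.toList)
      (List.filter (fun c => (PySem.Dict.get? compDict (String.ofList [c])).isNone) inputs.toList).length
      0 (List.filter (fun c => (PySem.Dict.get? compDict (String.ofList [c])).isNone) inputs.toList).length
      (le_refl _) (by omega)
  simpa using h
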